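-- pv_equiv track=rewrite | github.com/exponential-ventures/aurum | aurum/metadata/parameters_metadata.py | should_create_new_file
-- ===== SOURCE A (Python) =====
-- def should_create_new_file(d1, d2):
--     d1_keys = set(d1.keys())
--     d2_keys = set(d2.keys())
--     intersect_keys = d1_keys.intersection(d2_keys)
--     same = set(o for o in intersect_keys if d1[o] == d2[o])
--     if (len(same) == len(d1)):
--         return False
--
--     added = d1_keys - d2_keys
--     removed = d2_keys - d1_keys
--
--     if (len(added) > 0) or (len(removed) > 0):
--         return True
--
--     for k in intersect_keys:
--         if d1[k] != d2[k]:
--             return True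
--
--     return False
-- ===== SOURCE B (Python) =====
-- def should_create_new_file(d1, d2):
--     # One pass over d1: a new file is needed iff some d1 key is missing
--     # from d2 or mapped to a different value (extra d2-only keys never
--     # change A's result, and A's dead 'removed' branch is subsumed).
--     return any(k not in d2 or d1[k] != d2[k] for k in d1)
-- ===== Notes on version B (the rewrite author's own statement) =====
-- stated objective: simpler
-- what changed: Replaced the four intermediate sets (keys, intersection, 'same', added/removed) and the trailing loop by a single any() pass over d1 that checks each key's presence and value in d2.
import Mathlib
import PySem

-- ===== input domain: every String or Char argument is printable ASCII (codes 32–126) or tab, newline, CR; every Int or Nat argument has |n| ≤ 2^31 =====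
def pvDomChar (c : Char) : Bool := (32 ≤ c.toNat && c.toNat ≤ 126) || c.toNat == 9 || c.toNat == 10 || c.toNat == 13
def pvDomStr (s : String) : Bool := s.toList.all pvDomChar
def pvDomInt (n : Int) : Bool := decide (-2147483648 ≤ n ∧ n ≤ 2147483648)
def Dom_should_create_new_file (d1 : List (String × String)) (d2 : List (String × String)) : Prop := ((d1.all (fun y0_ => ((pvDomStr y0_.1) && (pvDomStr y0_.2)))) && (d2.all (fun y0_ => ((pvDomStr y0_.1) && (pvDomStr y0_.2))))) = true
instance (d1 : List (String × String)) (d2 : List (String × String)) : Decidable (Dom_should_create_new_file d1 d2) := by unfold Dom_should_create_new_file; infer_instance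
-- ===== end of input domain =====

-- B replaces A's intermediate key-sets (intersection, 'same', added/removed) and trailing loop
-- by a single any() pass over d1's keys — simpler, same result on every pair of dicts.


-- ===== PORT A =====
-- The final 'for k in intersect_keys' loop iterates a Python set but only computes an
-- order-independent any(), so List.any over the Set is exact.
def should_create_new_file (d1 : List (String × String)) (d2 : List (String × String)) : Bool :=
  let D1 := PySem.Dict.ofList d1
  let D2 := PySem.Dict.ofList d2
  let d1_keys : PySem.Set String := PySem.Set.ofList (PySem.Dict.keys D1)
  let d2_keys : PySem.Set String := PySem.Set.ofList (PySem.Dict.keys D2)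
  let intersect_keys : PySem.Set String := PySem.Set.inter d1_keys d2_keys
  let same : PySem.Set String :=
    PySem.Set.ofList (List.filter
      (fun o => PySem.Dict.get? D1 o == PySem.Dict.get? D2 o) intersect_keys)
  if PySem.Set.len same = (PySem.Dict.size D1 : Int) then false
  else
    let added := PySem.Set.diff d1_keys d2_keys
    let removed := PySem.Set.diff d2_keys d1_keys
    if 0 < PySem.Set.len added ∨ 0 < PySem.Set.len removed then true
    else
      List.any intersect_keys
        (fun k => !(PySem.Dict.get? D1 k == PySem.Dict.get? D2 k))

-- ===== PORT B =====
def should_create_new_file_alt (d1 : List (String × String)) (d2 : List (String × String)) : Bool :=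
  let D1 := PySem.Dict.ofList d1
  let D2 := PySem.Dict.ofList d2
  List.any (PySem.Dict.keys D1)
    (fun k => !(PySem.Dict.contains D2 k) || !(PySem.Dict.get? D1 k == PySem.Dict.get? D2 k))

-- ===== PRECONDITION & SPEC =====
def Spec_should_create_new_file (d1 : List (String × String)) (d2 : List (String × String)) (out : Bool) : Prop := out = should_create_new_file_alt d1 d2
instance (d1 : List (String × String)) (d2 : List (String × String)) (out : Bool) : Decidable (Spec_should_create_new_file d1 d2 out) := by unfold Spec_should_create_new_file; infer_instance

-- ===== CLAIM (what is proved, stated in full; the proofs are below) =====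
def Claim_equal_should_create_new_file : Prop := ∀ (d1 : List (String × String)) (d2 : List (String × String)), Dom_should_create_new_file d1 d2 → Spec_should_create_new_file d1 d2 (should_create_new_file d1 d2)

-- ===== LEMMAS AND PROOFS =====

theorem scnf_eq (d1 d2 : List (String × String)) :
    should_create_new_file d1 d2 = should_create_new_file_alt d1 d2 := by
  unfold should_create_new_file should_create_new_file_alt
  dsimp only
  set D1 := PySem.Dict.ofList d1 with hD1
  set D2 := PySem.Dict.ofList d2 with hD2
  set K1 := PySem.Dict.keys D1 with hK1
  set K2 := PySem.Dict.keys D2 with hK2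
  have h1 : K1.Nodup := PySem.Dict.nodup_keys_ofList d1
  have h2 : K2.Nodup := PySem.Dict.nodup_keys_ofList d2
  have hcontains : ∀ k, PySem.Set.contains K2 k = PySem.Dict.contains D2 k := by
    intro k
    rw [PySem.Set.contains_eq_decide, PySem.Dict.contains_eq_decide_mem_keys, hK2]
  rw [PySem.Set.ofList_eq_self_of_nodup _ h1, PySem.Set.ofList_eq_self_of_nodup _ h2]
  simp only [PySem.Set.inter, PySem.Set.diff]
  rw [PySem.Set.ofList_eq_self_of_nodup _ ((h1.filter _).filter _)]
  rw [List.filter_filter]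
  have hsize : PySem.Dict.size D1 = K1.length := by
    simp [hK1, PySem.Dict.keys, PySem.Dict.size]
  have hlen : ∀ (l : List String), PySem.Set.len l = (l.length : Int) := fun _ => rfl
  by_cases hall : ∀ k ∈ K1,
      ((PySem.Dict.get? D1 k == PySem.Dict.get? D2 k) && PySem.Set.contains K2 k) = true
  · -- A's first branch fires; B's any is false
    have hfilter : List.filter
        (fun a => (PySem.Dict.get? D1 a == PySem.Dict.get? D2 a) && PySem.Set.contains K2 a) K1 = K1 :=
      List.filter_eq_self.mpr hall
    rw [hfilter, hlen, hsize, if_pos rfl]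
    symm
    rw [List.any_eq_false]
    intro k hk
    have h := hall k hk
    rw [hcontains k] at h
    simp only [Bool.and_eq_true] at h
    simp [h.1, h.2]
  · -- some d1 key is absent or differs: both sides are true
    rw [hlen]
    have hne : ¬ ((List.filter
        (fun a => (PySem.Dict.get? D1 a == PySem.Dict.get? D2 a) && PySem.Set.contains K2 a) K1).length : Int)
        = (PySem.Dict.size D1 : Int) := by
      rw [hsize]
      intro h
      exact hall (List.length_filter_eq_length_iff.mp (by exact_mod_cast h))
    rw [if_neg hne]
    obtain ⟨k0, hk0, hk0f⟩ :
        ∃ k ∈ K1, ¬ ((PySem.Dict.get? D1 k == PySem.Dict.get? D2 k) && PySem.Set.contains K2 k) = true := by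
      by_contra hcon
      push_neg at hcon
      exact hall hcon
    have hk0' : ¬ ((PySem.Dict.get? D1 k0 == PySem.Dict.get? D2 k0) && PySem.Dict.contains D2 k0) = true := by
      rw [← hcontains k0]; exact hk0f
    have hB : List.any K1
        (fun k => !(PySem.Dict.contains D2 k) || !(PySem.Dict.get? D1 k == PySem.Dict.get? D2 k)) = true := by
      rw [List.any_eq_true]
      refine ⟨k0, hk0, ?_⟩
      simp only [Bool.and_eq_true, not_and_or, Bool.not_eq_true] at hk0'
      rcases hk0' with h | h <;> simp [h]
    rw [hB]
    split_ifs with hadd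
    · rfl
    · -- added and removed are empty: every d1 key is in d2, so the final loop finds k0
      push_neg at hadd
      have haddlen : (List.filter (fun x => !PySem.Set.contains K2 x) K1).length = 0 := by
        have h := hadd.1
        rw [hlen] at h
        omega
      have hsub : ∀ k ∈ K1, PySem.Set.contains K2 k = true := by
        intro k hk
        by_contra hx
        have hmem : k ∈ List.filter (fun x => !PySem.Set.contains K2 x) K1 :=
          List.mem_filter.mpr ⟨hk, by simpa using hx⟩
        rw [List.length_eq_zero_iff.mp haddlen] at hmem
        exact absurd hmem (List.not_mem_nil)
      rw [List.filter_eq_self.mpr hsub, List.any_eq_true]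
      refine ⟨k0, hk0, ?_⟩
      rw [hsub k0 hk0] at hk0f
      simp only [Bool.and_true, Bool.not_eq_true] at hk0f
      simp [hk0f]

-- ===== VERDICT (by name: the statement is the Claim_ definition above) =====
theorem should_create_new_file_spec : Claim_equal_should_create_new_file := by
  intro d1 d2 _
  unfold Spec_should_create_new_file
  exact scnf_eq d1 d2
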